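-- pv_equiv track=rewrite | github.com/strawhatboy/IAGNN | data_processor/yoochoose_dataset.py | next_cate_detail
-- ===== SOURCE A (Python) =====
-- from typing import List
--
-- def next_cate_detail(data: List[List[List]], thresholds: List[int]):
--     '''
--     split the data by occurence of next_cat in the session
--
--     Args:
--         data (List[List[List]]): list of [0, [item], [next_item](1), [category], [next_category](1)]
--         thresholds (List[int]): list of thresholds, e.g. [0, 1, 4] means [0, 1-3, 4-∞]
--     '''
--     # ret = [[], [], []]
--     # for s in data:
--     #     categories = s[3]
--     #     next_cat = s[4][0]
--     #     next_cat_count = categories.count(next_cat)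
--     #     # bisect(*) - 1: get next_cat_count position in thresholds
--     #     ret[bisect(thresholds, next_cat_count) - 1].append(s)
--     ret = [[], [], [], []]  # -2 and -1 是两种模型：一种是next cate=last cate，另一种是next cate!=last cate
--     for s in data:
--         categories = s[3]
--         next_cat = s[4][0]
--         next_cat_count = categories.count(next_cat)
--         if next_cat_count == 0:
--             ret[0].append(s)
--         elif next_cat_count <= 3:
--             ret[1].append(s)
--         else:
--             last_count = 0
--             l = len(categories)
--             for i in range(l):
--                 if categories[l - i - 1] == next_cat:
--                     last_count += 1
--                 else:
--                     break
--             if next_cat_count - last_count >= 1:  # un-continues pattern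
--                 ret[2].append(s)
--             else:
--                 ret[3].append(s)  # chunk pattern
--
--     return tuple(ret)
-- ===== SOURCE B (Python) =====
-- from typing import List
--
-- def next_cate_detail(data: List[List[List]], thresholds: List[int]):
--     def bucket(s):
--         categories = s[3]
--         next_cat = s[4][0]
--         cnt = sum(c == next_cat for c in categories)
--         if cnt == 0:
--             return 0
--         if cnt <= 3:
--             return 1
--         if categories[len(categories) - cnt:] == [next_cat] * cnt:
--             return 3  # chunk pattern: the occurrences are exactly the tail
--         return 2      # un-continuous pattern
--     return tuple([s for s in data if bucket(s) == k] for k in range(4))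
-- ===== Notes on version B (the rewrite author's own statement) =====
-- stated objective: alternative
-- what changed: A per-session classifier (count as a boolean sum, chunk test as suffix == [next_cat]*cnt) plus four grouping filter passes over data replace A's single appending loop with count() and a reverse tail-scan.
import Mathlib
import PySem

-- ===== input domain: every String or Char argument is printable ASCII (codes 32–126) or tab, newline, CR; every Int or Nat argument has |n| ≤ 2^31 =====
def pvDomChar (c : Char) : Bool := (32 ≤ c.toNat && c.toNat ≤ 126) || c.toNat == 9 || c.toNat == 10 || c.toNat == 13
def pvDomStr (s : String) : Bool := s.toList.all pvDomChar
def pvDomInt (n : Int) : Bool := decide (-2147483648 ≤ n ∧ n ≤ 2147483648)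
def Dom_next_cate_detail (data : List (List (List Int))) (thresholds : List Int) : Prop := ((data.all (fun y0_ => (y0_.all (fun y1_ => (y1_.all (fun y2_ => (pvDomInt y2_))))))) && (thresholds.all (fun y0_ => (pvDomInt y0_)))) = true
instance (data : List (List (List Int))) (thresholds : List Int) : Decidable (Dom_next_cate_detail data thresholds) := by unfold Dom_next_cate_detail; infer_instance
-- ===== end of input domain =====

-- B replaces A's single appending loop (count() + reverse tail-scan with break) by a
-- per-session classifier (count as a boolean sum, chunk test as a suffix comparison
-- against [next_cat]*cnt) and four grouping filter passes; objective: alternative.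

-- ===== PORT A =====
-- A's inner loop: for i in range(l): if categories[l-i-1]==next_cat: last_count+=1 else: break
-- state = (last_count, broken); pyGetD is exact here since 0 ≤ l-i-1 < l for every i the loop visits
def pvTailA (categories : List Int) (next_cat : Int) : Int :=
  ((PySem.List.pyRange 0 (categories.length) 1).foldl
    (fun st i =>
      if st.2 then st
      else if PySem.List.pyGetD categories ((categories.length : Int) - i - 1) 0 = next_cat
        then (st.1 + 1, false) else (st.1, true))
    ((0 : Int), false)).1

-- one iteration of A's main loop over the 4 ret lists (ret[k].append s)
def pvStepA (r : List (List (List Int)) × List (List (List Int)) × List (List (List Int)) × List (List (List Int)))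
    (s : List (List Int)) :
    List (List (List Int)) × List (List (List Int)) × List (List (List Int)) × List (List (List Int)) :=
  let categories := PySem.List.pyGetD s 3 []
  let next_cat := PySem.List.pyGetD (PySem.List.pyGetD s 4 []) 0 0
  let next_cat_count := PySem.List.count categories next_cat
  if next_cat_count = 0 then (r.1 ++ [s], r.2.1, r.2.2.1, r.2.2.2)
  else if next_cat_count ≤ 3 then (r.1, r.2.1 ++ [s], r.2.2.1, r.2.2.2)
  else
    let last_count := pvTailA categories next_cat
    if (next_cat_count : Int) - last_count ≥ 1 then (r.1, r.2.1, r.2.2.1 ++ [s], r.2.2.2)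
    else (r.1, r.2.1, r.2.2.1, r.2.2.2 ++ [s])

def next_cate_detail (data : List (List (List Int))) (thresholds : List Int) : List (List (List (List Int))) :=
  let r := data.foldl pvStepA ([], [], [], [])
  [r.1, r.2.1, r.2.2.1, r.2.2.2]

-- ===== PORT B =====
-- Source B's bucket(s): cnt = sum(c == next_cat for c in categories); the chunk test is
-- categories[len(categories)-cnt:] == [next_cat]*cnt
def pvBucket (s : List (List Int)) : Int :=
  let categories := PySem.List.pyGetD s 3 []
  let next_cat := PySem.List.pyGetD (PySem.List.pyGetD s 4 []) 0 0
  let cnt := categories.foldl (fun a c => a + (if c = next_cat then 1 else 0)) (0 : Int)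
  if cnt = 0 then 0
  else if cnt ≤ 3 then 1
  else if PySem.List.slice categories (some ((categories.length : Int) - cnt)) none
          = PySem.List.pyRepeat [next_cat] cnt then 3
  else 2

-- return tuple([s for s in data if bucket(s) == k] for k in range(4))
def next_cate_detail_alt (data : List (List (List Int))) (thresholds : List Int) : List (List (List (List Int))) :=
  (PySem.List.pyRange 0 4 1).map (fun k => data.filter (fun s => pvBucket s == k))

-- ===== PRECONDITION & SPEC =====
-- A raises IndexError when some session has fewer than 5 fields or its s[4] is empty; exactly those inputs are excluded.
def Pre_next_cate_detail (data : List (List (List Int))) (thresholds : List Int) : Prop :=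
  ∀ s ∈ data, 5 ≤ s.length ∧ s.getD 4 [] ≠ []
instance (data : List (List (List Int))) (thresholds : List Int) : Decidable (Pre_next_cate_detail data thresholds) := by unfold Pre_next_cate_detail; infer_instance

def pvWitness_next_cate_detail : List (List (List Int)) × List Int :=
  ([[[0], [1], [2], [1, 2, 1], [1]], [[0], [3], [4], [2, 2, 2, 2], [2]]], [0, 1, 4])

def Spec_next_cate_detail (data : List (List (List Int))) (thresholds : List Int) (out : List (List (List (List Int)))) : Prop := out = next_cate_detail_alt data thresholds
instance (data : List (List (List Int))) (thresholds : List Int) (out : List (List (List (List Int)))) : Decidable (Spec_next_cate_detail data thresholds out) := by unfold Spec_next_cate_detail; infer_instance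

-- ===== CLAIM (what is proved, stated in full; the proofs are below) =====
def Claim_equal_next_cate_detail : Prop := ∀ (data : List (List (List Int))) (thresholds : List Int), Dom_next_cate_detail data thresholds → Pre_next_cate_detail data thresholds → Spec_next_cate_detail data thresholds (next_cate_detail data thresholds)


-- ===== LEMMAS AND PROOFS =====

-- the predicate "equals next_cat" as a Bool
def pvP (c : Int) : Int → Bool := fun x => decide (x = c)

-- the takeWhile length never exceeds the count
theorem pv_tw_le_count (cats : List Int) (c : Int) :
    (cats.reverse.takeWhile (pvP c)).length ≤ List.count c cats := by
  have hsub : (cats.reverse.takeWhile (pvP c)).Sublist cats.reverse :=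
    List.takeWhile_sublist _
  have hlen : List.countP (fun x => x == c) (cats.reverse.takeWhile (pvP c))
      = (cats.reverse.takeWhile (pvP c)).length := by
    rw [List.countP_eq_length]
    intro a ha
    have := List.mem_takeWhile_imp ha
    simp [pvP] at this
    simp [this]
  calc (cats.reverse.takeWhile (pvP c)).length
      = List.countP (fun x => x == c) (cats.reverse.takeWhile (pvP c)) := hlen.symm
    _ ≤ List.countP (fun x => x == c) cats.reverse := hsub.countP_le
    _ = List.count c cats.reverse := List.count_eq_countP.symm
    _ = List.count c cats := List.count_reverse

-- a prefix of elements all satisfying p pushes the takeWhile length up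
theorem pv_le_tw (pb : Int → Bool) :
    ∀ (l : List Int) (n : Nat) (h : n ≤ l.length),
      (∀ j (hj : j < n), pb (l[j]'(hj.trans_le h))) → n ≤ (l.takeWhile pb).length := by
  intro l
  induction l with
  | nil => intro n h _; simpa using h
  | cons x xs ih =>
    intro n h hall
    cases n with
    | zero => simp
    | succ m =>
      have hx : pb x := hall 0 (Nat.succ_pos m)
      have hrec : m ≤ (xs.takeWhile pb).length := by
        apply ih m (by simpa using h)
        intro j hj
        exact hall (j + 1) (by omega)
      simp [hx]
      omega

-- elements within the takeWhile length satisfy p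
theorem pv_tw_getElem (pb : Int → Bool) (l : List Int) (j : Nat)
    (hj : j < (l.takeWhile pb).length) :
    pb (l[j]'(hj.trans_le (List.takeWhile_sublist pb).length_le)) := by
  have hp : (l.takeWhile pb) <+: l := List.takeWhile_prefix pb
  have hmem : (l.takeWhile pb)[j] ∈ l.takeWhile pb := List.getElem_mem hj
  have := List.mem_takeWhile_imp hmem
  rwa [List.IsPrefix.getElem hp hj] at this

-- A's broken flag sticks
theorem pv_fold_broken (c : Int) :
    ∀ (l : List Int) (a : Int),
      l.foldl (fun st x => if st.2 then st else if x = c then (st.1 + 1, false) else (st.1, true))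
        (a, true) = (a, true) := by
  intro l
  induction l with
  | nil => intro a; rfl
  | cons x xs ih => intro a; simp; exact ih a

-- A's un-broken run counts the takeWhile prefix
theorem pv_fold_run (c : Int) :
    ∀ (l : List Int) (a : Int),
      (l.foldl (fun st x => if st.2 then st else if x = c then (st.1 + 1, false) else (st.1, true))
        (a, false)).1 = a + ((l.takeWhile (pvP c)).length : Int) := by
  intro l
  induction l with
  | nil => intro a; simp
  | cons x xs ih =>
    intro a
    by_cases hx : x = c
    · simp only [List.foldl_cons]
      norm_num [pvP, hx]
      rw [ih (a + 1)]
      ring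
    · simp only [List.foldl_cons]
      norm_num [pvP, hx]
      rw [pv_fold_broken c xs a]

-- A's tail loop is the takeWhile length of the reversed list
theorem pv_tailA_eq (cats : List Int) (c : Int) :
    pvTailA cats c = ((cats.reverse.takeWhile (pvP c)).length : Int) := by
  unfold pvTailA
  have hcongr :
      (PySem.List.pyRange 0 (cats.length) 1).foldl
        (fun st i =>
          if st.2 then st
          else if PySem.List.pyGetD cats ((cats.length : Int) - i - 1) 0 = c
            then (st.1 + 1, false) else (st.1, true))
        ((0 : Int), false)
      = (PySem.List.pyRange 0 (cats.reverse.length) 1).foldl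
        (fun st i =>
          if st.2 then st
          else if PySem.List.pyGetD cats.reverse i 0 = c
            then (st.1 + 1, false) else (st.1, true))
        ((0 : Int), false) := by
    rw [List.length_reverse]
    apply PySem.List.foldl_congr_mem
    intro st i hi
    rw [PySem.List.mem_pyRange_one] at hi
    have h0 : (0 : Int) ≤ i := hi.1
    have hl : i < (cats.length : Int) := hi.2
    have hget : PySem.List.pyGetD cats ((cats.length : Int) - i - 1) 0
        = PySem.List.pyGetD cats.reverse i 0 := by
      rw [PySem.List.pyGetD_eq_getElem cats 0 (by omega) (by omega),
          PySem.List.pyGetD_eq_getElem cats.reverse 0 h0 (by simpa using hl)]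
      rw [List.getElem_reverse]
      congr 1
      omega
    rw [hget]
  rw [hcongr]
  rw [PySem.List.foldl_pyRange_zero_pyGetD' cats.reverse 0
        (fun st x => if st.2 then st else if x = c then (st.1 + 1, false) else (st.1, true))
        ((0 : Int), false)]
  rw [pv_fold_run c cats.reverse 0]
  ring

-- B's boolean sum is the count
theorem pv_cnt_eq (c : Int) :
    ∀ (l : List Int) (a : Int),
      l.foldl (fun a x => a + (if x = c then 1 else 0)) a = a + (List.count c l : Int) := by
  intro l
  induction l with
  | nil => intro a; simp
  | cons x xs ih =>
    intro a
    by_cases hx : x = c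
    · have h1 : (if x = c then (1 : Int) else 0) = 1 := if_pos hx
      simp only [List.foldl_cons, h1]
      rw [ih (a + 1), hx, List.count_cons_self]
      push_cast
      ring
    · have h1 : (if x = c then (1 : Int) else 0) = 0 := if_neg hx
      simp only [List.foldl_cons, h1, add_zero]
      rw [ih a, List.count_cons]
      simp [hx]

-- the chunk test: the count-length suffix is all c iff the reverse takeWhile reaches the count
theorem pv_suffix_iff (cats : List Int) (c : Int) :
    cats.drop (cats.length - List.count c cats) = List.replicate (List.count c cats) c
      ↔ (cats.reverse.takeWhile (pvP c)).length = List.count c cats := by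
  have hle : List.count c cats ≤ cats.length := List.count_le_length
  set n := List.count c cats with hn
  set k := cats.length - n with hk
  constructor
  · intro h
    apply le_antisymm (pv_tw_le_count cats c)
    apply pv_le_tw (pvP c) cats.reverse n (by simpa using hle)
    intro j hj
    rw [List.getElem_reverse]
    have hq : cats[cats.length - 1 - j]? = some c := by
      rw [show cats.length - 1 - j = k + (n - 1 - j) by omega,
          ← List.getElem?_drop, h, List.getElem?_replicate, if_pos (by omega)]
    have hlt : cats.length - 1 - j < cats.length := by omega
    rw [List.getElem?_eq_getElem hlt] at hq
    have hv : cats[cats.length - 1 - j]'hlt = c := Option.some.inj hq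
    simp [pvP, hv]
  · intro ht
    apply List.ext_getElem
    · rw [List.length_drop, List.length_replicate]
      omega
    · intro j hj1 hj2
      have hjn : j < n := by simpa using hj2
      have hm : cats.length - 1 - (k + j) < (cats.reverse.takeWhile (pvP c)).length := by
        rw [ht]; omega
      have hval := pv_tw_getElem (pvP c) cats.reverse _ hm
      rw [List.getElem_reverse] at hval
      simp only [pvP, decide_eq_true_eq] at hval
      have hlt2 : cats.length - 1 - (cats.length - 1 - (k + j)) < cats.length := by omega
      have hq : cats[cats.length - 1 - (cats.length - 1 - (k + j))]? = some c := by
        rw [List.getElem?_eq_getElem hlt2]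
        exact congrArg some hval
      rw [show cats.length - 1 - (cats.length - 1 - (k + j)) = k + j by omega] at hq
      have hq2 : (cats.drop k)[j]? = some c := by
        rw [List.getElem?_drop]; exact hq
      rw [List.getElem?_eq_getElem hj1] at hq2
      rw [List.getElem_replicate]
      exact Option.some.inj hq2

-- B's classifier over explicit categories/next_cat
theorem pv_bucket_char (cats : List Int) (c : Int) :
    (if (List.count c cats : Int) = 0 then (0 : Int)
     else if (List.count c cats : Int) ≤ 3 then 1
     else if PySem.List.slice cats (some ((cats.length : Int) - (List.count c cats : Int))) none
             = PySem.List.pyRepeat [c] ((List.count c cats : Int)) then 3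
     else 2)
    = (if List.count c cats = 0 then (0 : Int)
       else if List.count c cats ≤ 3 then 1
       else if (cats.reverse.takeWhile (pvP c)).length = List.count c cats then 3
       else 2) := by
  set n := List.count c cats with hn
  have hle : n ≤ cats.length := hn ▸ List.count_le_length
  have hslice : PySem.List.slice cats (some ((cats.length : Int) - (n : Int))) none
      = cats.drop (cats.length - n) := by
    rw [PySem.List.slice_from cats (by omega)]
    congr 1
    omega
  have hrep : PySem.List.pyRepeat [c] ((n : Int)) = List.replicate n c := by
    rw [PySem.List.pyRepeat_singleton]
    congr 1
  rw [hslice, hrep]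
  by_cases h0 : n = 0
  · simp [h0]
  · have h0i : ¬ ((n : Int) = 0) := by exact_mod_cast h0
    by_cases h3 : n ≤ 3
    · have h3i : ((n : Int) ≤ 3) := by exact_mod_cast h3
      simp [h0, h3, h3i]
    · have h3i : ¬ ((n : Int) ≤ 3) := by exact_mod_cast h3
      rw [if_neg h0i, if_neg h3i, if_neg h0, if_neg h3]
      by_cases hch : cats.drop (cats.length - n) = List.replicate n c
      · rw [if_pos hch, if_pos ((pv_suffix_iff cats c).mp hch)]
      · rw [if_neg hch, if_neg (fun ht => hch ((pv_suffix_iff cats c).mpr ht))]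

-- A's step appends s to the component picked by B's classifier
theorem pv_stepA_bucket
    (r : List (List (List Int)) × List (List (List Int)) × List (List (List Int)) × List (List (List Int)))
    (s : List (List Int)) :
    pvStepA r s =
      if pvBucket s = 0 then (r.1 ++ [s], r.2.1, r.2.2.1, r.2.2.2)
      else if pvBucket s = 1 then (r.1, r.2.1 ++ [s], r.2.2.1, r.2.2.2)
      else if pvBucket s = 2 then (r.1, r.2.1, r.2.2.1 ++ [s], r.2.2.2)
      else (r.1, r.2.1, r.2.2.1, r.2.2.2 ++ [s]) := by
  have hB : pvBucket s =
      (if List.count (PySem.List.pyGetD (PySem.List.pyGetD s 4 []) 0 0) (PySem.List.pyGetD s 3 []) = 0 then (0 : Int)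
       else if List.count (PySem.List.pyGetD (PySem.List.pyGetD s 4 []) 0 0) (PySem.List.pyGetD s 3 []) ≤ 3 then 1
       else if ((PySem.List.pyGetD s 3 []).reverse.takeWhile (pvP (PySem.List.pyGetD (PySem.List.pyGetD s 4 []) 0 0))).length
               = List.count (PySem.List.pyGetD (PySem.List.pyGetD s 4 []) 0 0) (PySem.List.pyGetD s 3 []) then 3
       else 2) := by
    simp only [pvBucket]
    rw [pv_cnt_eq _ _ 0, zero_add]
    exact pv_bucket_char _ _
  rw [hB]
  simp only [pvStepA, PySem.List.count_eq, pv_tailA_eq]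
  set cats := PySem.List.pyGetD s 3 [] with hcats
  set c := PySem.List.pyGetD (PySem.List.pyGetD s 4 []) 0 0 with hc
  set n := List.count c cats with hn
  by_cases h0 : n = 0
  · simp [h0]
  · by_cases h3 : n ≤ 3
    · simp [h0, h3]
    · simp only [if_neg h0, if_neg h3]
      have hletw : (cats.reverse.takeWhile (pvP c)).length ≤ n := hn ▸ pv_tw_le_count cats c
      by_cases ht : (cats.reverse.takeWhile (pvP c)).length = n
      · have hA : ¬ ((n : Int) - ((cats.reverse.takeWhile (pvP c)).length : Int) ≥ 1) := by
          rw [ht]; omega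
        rw [if_neg hA, if_pos ht]
        norm_num
      · have hA : (n : Int) - ((cats.reverse.takeWhile (pvP c)).length : Int) ≥ 1 := by
          have : (cats.reverse.takeWhile (pvP c)).length < n := lt_of_le_of_ne hletw ht
          omega
        rw [if_pos hA, if_neg ht]
        norm_num

-- the fold of A's steps is the four bucket filters
theorem pv_fold_filter :
    ∀ (data : List (List (List Int)))
      (r : List (List (List Int)) × List (List (List Int)) × List (List (List Int)) × List (List (List Int))),
      data.foldl pvStepA r =
        (r.1 ++ data.filter (fun s => pvBucket s == 0),
         r.2.1 ++ data.filter (fun s => pvBucket s == 1),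
         r.2.2.1 ++ data.filter (fun s => pvBucket s == 2),
         r.2.2.2 ++ data.filter (fun s => pvBucket s == 3)) := by
  intro data
  induction data with
  | nil => intro r; simp
  | cons s ds ih =>
    intro r
    rw [List.foldl_cons, ih, pv_stepA_bucket]
    have hb : pvBucket s = 0 ∨ pvBucket s = 1 ∨ pvBucket s = 2 ∨ pvBucket s = 3 := by
      simp only [pvBucket]
      split_ifs <;> simp
    rcases hb with h | h | h | h <;> simp [h]
  
-- ===== VERDICT (by name: the statement is the Claim_ definition above) =====
theorem next_cate_detail_spec : Claim_equal_next_cate_detail := by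
  intro data thresholds _ _
  unfold Spec_next_cate_detail next_cate_detail next_cate_detail_alt
  rw [pv_fold_filter data ([], [], [], [])]
  have hr : PySem.List.pyRange 0 4 1 = [0, 1, 2, 3] := by decide
  simp [hr]
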